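-- pv_equiv track=rewrite | github.com/inmonim/algorithm | 백준/Silver/1195. 킥다운/킥다운.py | find_minimum_width
-- ===== SOURCE A (Python) =====
-- def find_minimum_width(first_gear, second_gear):
--     len_first = len(first_gear)
--     len_second = len(second_gear)
--
--     # 최소 너비를 현재 두 문자열 길이 합으로 초기화
--     min_width = len_first + len_second
--
--     # 첫 번째 기어를 왼쪽으로 이동하면서 체크
--     for offset in range(-len_second + 1, len_first):
--         valid = True
--         for i in range(len_second):
--             pos = offset + i
--             if 0 <= pos < len_first:  # 겹치는 경우만 체크
--                 if first_gear[pos] == '2' and second_gear[i] == '2':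
--                     valid = False
--                     break
--         if valid:
--             # 현재 너비 계산: 왼쪽 시작과 오른쪽 끝 간격
--             left = min(0, offset)
--             right = max(len_first, offset + len_second)
--             min_width = min(min_width, right - left)
--
--     return min_width
-- ===== SOURCE B (Python) =====
-- def find_minimum_width(first_gear, second_gear):
--     n = len(first_gear)
--     m = len(second_gear)
--     # every colliding shift comes from a pair of '2' teeth: offset = i - j
--     p = [i for i, c in enumerate(first_gear) if c == '2']
--     q = [j for j, c in enumerate(second_gear) if c == '2']
--     bad = {i - j for i in p for j in q}
--     # search overlaps v = min(n, m), min(n, m)-1, ..., 1: the shifts achieving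
--     # overlap >= v form the interval [v - m, n - v]; by counting how many bad
--     # shifts fall in it we know whether a collision-free shift with that overlap
--     # exists, without testing any individual shift.
--     v = min(n, m)
--     while v > 0:
--         lo = v - m
--         hi = n - v
--         cnt = sum(1 for x in bad if lo <= x <= hi)
--         if hi - lo + 1 > cnt:
--             return n + m - v
--         v -= 1
--     return n + m
-- ===== Notes on version B (the rewrite author's own statement) =====
-- stated objective: faster
-- what changed: B never tests a shift for collision: it enumerates the colliding shifts directly as differences of '2' positions, then searches overlaps v downward, deciding by counting bad shifts in the interval [v-m, n-v] whether a collision-free shift of overlap v exists, and returns n+m-v at the first unsaturated interval.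
import Mathlib
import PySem

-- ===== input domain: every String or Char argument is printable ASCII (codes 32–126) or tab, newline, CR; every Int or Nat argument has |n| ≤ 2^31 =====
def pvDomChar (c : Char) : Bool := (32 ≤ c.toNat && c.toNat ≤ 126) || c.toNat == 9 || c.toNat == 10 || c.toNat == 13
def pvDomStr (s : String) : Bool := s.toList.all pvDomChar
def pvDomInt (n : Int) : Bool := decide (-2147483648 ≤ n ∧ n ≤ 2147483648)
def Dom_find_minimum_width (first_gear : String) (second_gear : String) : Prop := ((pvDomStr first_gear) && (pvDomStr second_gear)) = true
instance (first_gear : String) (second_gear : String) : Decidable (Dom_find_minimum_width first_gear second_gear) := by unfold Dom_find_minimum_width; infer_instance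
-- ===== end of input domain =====

-- B replaces A's per-shift collision scan by a different algorithm: it enumerates the
-- colliding shifts as differences of '2' positions and finds the largest feasible
-- overlap v by counting bad shifts in the interval of shifts achieving overlap ≥ v.

-- ===== PORT A =====
-- inner loop 'for i in range(len_second): … break' of A, over the remaining indices
def pvCheckA (f s : List Char) (lenF : Int) (offset : Int) : List Int → Bool
  | [] => true
  | i :: rest =>
    let pos := offset + i
    if 0 ≤ pos ∧ pos < lenF then
      if PySem.List.pyGet? f pos = some '2' ∧ PySem.List.pyGet? s i = some '2' then
        false
      else pvCheckA f s lenF offset rest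
    else pvCheckA f s lenF offset rest

def find_minimum_width (first_gear : String) (second_gear : String) : Int :=
  let f := first_gear.toList
  let s := second_gear.toList
  let len_first : Int := f.length
  let len_second : Int := s.length
  (PySem.List.pyRange (-len_second + 1) len_first 1).foldl
    (fun min_width offset =>
      if pvCheckA f s len_first offset (PySem.List.pyRange 0 len_second 1) then
        min min_width (max len_first (offset + len_second) - min 0 offset)
      else min_width)
    (len_first + len_second)

-- ===== PORT B =====
-- '[i for i, c in enumerate(gear) if c == '2']'
def pvIdx2 (l : List Char) : List Int :=
  (PySem.List.enumerate l).filterMap (fun ic => if ic.2 = '2' then some ic.1 else none)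

-- 'while v > 0: … v -= 1' countdown with the early return
def pvLoopB (n m : Int) (bad : List Int) : Nat → Int
  | 0 => n + m
  | v + 1 =>
    let vi : Int := (v : Int) + 1
    let lo := vi - m
    let hi := n - vi
    let cnt := bad.countP (fun x => decide (lo ≤ x ∧ x ≤ hi))
    if hi - lo + 1 > (cnt : Int) then n + m - vi else pvLoopB n m bad v

def find_minimum_width_alt (first_gear : String) (second_gear : String) : Int :=
  let f := first_gear.toList
  let s := second_gear.toList
  let n : Int := f.length
  let m : Int := s.length
  let p := pvIdx2 f
  let q := pvIdx2 s
  let bad : PySem.Set Int := PySem.Set.ofList (p.flatMap (fun i => q.map (fun j => i - j)))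
  pvLoopB n m bad (min n m).toNat

-- ===== PRECONDITION & SPEC =====
def Spec_find_minimum_width (first_gear : String) (second_gear : String) (out : Int) : Prop := out = find_minimum_width_alt first_gear second_gear
instance (first_gear : String) (second_gear : String) (out : Int) : Decidable (Spec_find_minimum_width first_gear second_gear out) := by unfold Spec_find_minimum_width; infer_instance

-- ===== CLAIM (what is proved, stated in full; the proofs are below) =====
def Claim_equal_find_minimum_width : Prop := ∀ (first_gear : String) (second_gear : String), Dom_find_minimum_width first_gear second_gear → Spec_find_minimum_width first_gear second_gear (find_minimum_width first_gear second_gear)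

-- ===== LEMMAS AND PROOFS =====

-- overlap of the two gears at a given shift
def pvOv (n m o : Int) : Int := min n (o + m) - max 0 o

-- the list of colliding shifts, before dedup
def pvBadPairs (f s : List Char) : List Int :=
  (pvIdx2 f).flatMap (fun i => (pvIdx2 s).map (fun j => i - j))

-- running maximum of w over the elements of L passing c
def pvGMax (w : Int → Int) (c : Int → Bool) (L : List Int) (b : Int) : Int :=
  L.foldl (fun b o => if c o then max b (w o) else b) b

theorem pvGMax_init_le (w : Int → Int) (c : Int → Bool) (L : List Int) (b : Int) :
    b ≤ pvGMax w c L b := by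
  induction L generalizing b with
  | nil => simp [pvGMax]
  | cons a L ih =>
    simp only [pvGMax, List.foldl_cons]
    split_ifs
    · exact le_trans (le_max_left _ _) (ih _)
    · exact ih b

theorem pvGMax_le_of_mem (w : Int → Int) (c : Int → Bool) (L : List Int) (b o : Int)
    (ho : o ∈ L) (hc : c o = true) : w o ≤ pvGMax w c L b := by
  induction L generalizing b with
  | nil => cases ho
  | cons a L ih =>
    simp only [pvGMax, List.foldl_cons]
    rcases List.mem_cons.mp ho with rfl | hmem
    · rw [if_pos hc]
      exact le_trans (le_max_right _ _) (pvGMax_init_le w c L _)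
    · split_ifs <;> exact ih _ hmem

theorem pvGMax_eq_init_or_mem (w : Int → Int) (c : Int → Bool) (L : List Int) (b : Int) :
    pvGMax w c L b = b ∨ ∃ o ∈ L, c o = true ∧ pvGMax w c L b = w o := by
  induction L generalizing b with
  | nil => exact Or.inl rfl
  | cons a L ih =>
    simp only [pvGMax, List.foldl_cons]
    split_ifs with hc
    · rcases ih (max b (w a)) with h | ⟨o, ho, hco, heq⟩
      · rcases max_cases b (w a) with ⟨hm, _⟩ | ⟨hm, _⟩
        · exact Or.inl (h.trans hm)
        · exact Or.inr ⟨a, List.mem_cons_self, hc, h.trans hm⟩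
      · exact Or.inr ⟨o, List.mem_cons_of_mem _ ho, hco, heq⟩
    · rcases ih b with h | ⟨o, ho, hco, heq⟩
      · exact Or.inl h
      · exact Or.inr ⟨o, List.mem_cons_of_mem _ ho, hco, heq⟩

-- A's min-of-widths fold is n + m minus the max-overlap fold
theorem foldA_eq (f s : List Char) (L : List Int) (b : Int) :
    L.foldl
      (fun min_width offset =>
        if pvCheckA f s (f.length : Int) offset (PySem.List.pyRange 0 (s.length : Int) 1) then
          min min_width (max (f.length : Int) (offset + (s.length : Int)) - min 0 offset)
        else min_width)
      ((f.length : Int) + (s.length : Int) - b)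
    = (f.length : Int) + (s.length : Int) -
        pvGMax (pvOv (f.length : Int) (s.length : Int))
          (fun o => pvCheckA f s (f.length : Int) o (PySem.List.pyRange 0 (s.length : Int) 1)) L b := by
  induction L generalizing b with
  | nil => simp [pvGMax]
  | cons a L ih =>
    simp only [pvGMax, List.foldl_cons] at ih ⊢
    split_ifs with hc
    · rw [show min ((f.length : Int) + (s.length : Int) - b)
          (max (f.length : Int) (a + (s.length : Int)) - min 0 a)
        = (f.length : Int) + (s.length : Int) - max b (pvOv (f.length : Int) (s.length : Int) a) by
          unfold pvOv; omega]
      exact ih _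
    · exact ih b

-- membership in the '2'-index list
theorem mem_enumerate {α : Type} (l : List α) (st : Int) (p : Int × α) :
    p ∈ PySem.List.enumerate l st ↔ ∃ k : Nat, k < l.length ∧ p.1 = st + k ∧ l[k]? = some p.2 := by
  induction l generalizing st with
  | nil => simp [PySem.List.enumerate_nil]
  | cons x xs ih =>
    rw [PySem.List.enumerate_cons, List.mem_cons, ih]
    constructor
    · rintro (rfl | ⟨k, hk, h1, h2⟩)
      · exact ⟨0, by simp, by simp, by simp⟩
      · exact ⟨k + 1, by simpa using hk, by push_cast; omega, by simpa using h2⟩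
    · rintro ⟨k, hk, h1, h2⟩
      cases k with
      | zero =>
        left
        simp only [List.getElem?_cons_zero, Option.some.injEq] at h2
        obtain ⟨a, b⟩ := p
        simp_all
      | succ k =>
        right
        exact ⟨k, by simpa using hk, by push_cast at h1 ⊢; omega, by simpa using h2⟩

theorem mem_pvIdx2 (l : List Char) (x : Int) :
    x ∈ pvIdx2 l ↔ ∃ k : Nat, k < l.length ∧ x = (k : Int) ∧ l[k]? = some '2' := by
  unfold pvIdx2
  rw [List.mem_filterMap]
  constructor
  · rintro ⟨⟨i, c⟩, hmem, hf⟩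
    rw [mem_enumerate] at hmem
    obtain ⟨k, hk, h1, h2⟩ := hmem
    dsimp only at hf h1 h2
    split at hf
    · injection hf with hf
      subst hf
      rename_i hc
      subst hc
      exact ⟨k, hk, by omega, h2⟩
    · exact absurd hf (by simp)
  · rintro ⟨k, hk, rfl, h2⟩
    exact ⟨((k : Int), '2'), (mem_enumerate l 0 _).mpr ⟨k, hk, by simp, h2⟩, by simp⟩

theorem mem_pvBadPairs (f s : List Char) (o : Int) :
    o ∈ pvBadPairs f s ↔ ∃ i j : Nat, i < f.length ∧ j < s.length ∧
      f[i]? = some '2' ∧ s[j]? = some '2' ∧ o = (i : Int) - (j : Int) := by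
  unfold pvBadPairs
  rw [List.mem_flatMap]
  constructor
  · rintro ⟨x, hx, hmap⟩
    rw [List.mem_map] at hmap
    obtain ⟨y, hy, rfl⟩ := hmap
    obtain ⟨i, hi, rfl, hf⟩ := (mem_pvIdx2 f x).mp hx
    obtain ⟨j, hj, rfl, hs⟩ := (mem_pvIdx2 s y).mp hy
    exact ⟨i, j, hi, hj, hf, hs, rfl⟩
  · rintro ⟨i, j, hi, hj, hf, hs, rfl⟩
    exact ⟨(i : Int), (mem_pvIdx2 f _).mpr ⟨i, hi, rfl, hf⟩,
      List.mem_map.mpr ⟨(j : Int), (mem_pvIdx2 s _).mpr ⟨j, hj, rfl, hs⟩, rfl⟩⟩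

-- A's inner scan as a universally quantified statement
theorem pvCheckA_iff (f s : List Char) (lenF offset : Int) (L : List Int) :
    pvCheckA f s lenF offset L = true ↔
      ∀ i ∈ L, ¬ (0 ≤ offset + i ∧ offset + i < lenF ∧
        PySem.List.pyGet? f (offset + i) = some '2' ∧ PySem.List.pyGet? s i = some '2') := by
  induction L with
  | nil => simp [pvCheckA]
  | cons i rest ih =>
    simp only [pvCheckA, List.forall_mem_cons]
    split_ifs with h1 h2
    · constructor
      · intro hf; simp at hf
      · rintro ⟨hni, _⟩; exact absurd ⟨h1.1, h1.2, h2.1, h2.2⟩ hni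
    · rw [ih]
      have hni : ¬ (0 ≤ offset + i ∧ offset + i < lenF ∧
          PySem.List.pyGet? f (offset + i) = some '2' ∧ PySem.List.pyGet? s i = some '2') :=
        fun hc => h2 ⟨hc.2.2.1, hc.2.2.2⟩
      exact (and_iff_right hni).symm
    · rw [ih]
      have hni : ¬ (0 ≤ offset + i ∧ offset + i < lenF ∧
          PySem.List.pyGet? f (offset + i) = some '2' ∧ PySem.List.pyGet? s i = some '2') :=
        fun hc => h1 ⟨hc.1, hc.2.1⟩
      exact (and_iff_right hni).symm

-- A's validity test at a shift = the shift is not a difference of '2' positions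
theorem validA_iff (f s : List Char) (o : Int) :
    pvCheckA f s (f.length : Int) o (PySem.List.pyRange 0 (s.length : Int) 1) = true ↔
      o ∉ pvBadPairs f s := by
  rw [pvCheckA_iff]
  constructor
  · intro hall hbad
    obtain ⟨i, j, hi, hj, hf, hs, rfl⟩ := (mem_pvBadPairs f s o).mp hbad
    refine hall (j : Int) (PySem.List.mem_pyRange_one.mpr ⟨by omega, by exact_mod_cast hj⟩)
      ⟨by omega, by omega, ?_, ?_⟩
    · rw [show ((i : Int) - (j : Int)) + (j : Int) = (i : Int) by omega,
        PySem.List.pyGet?_natCast]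
      exact hf
    · rw [PySem.List.pyGet?_natCast]; exact hs
  · intro hnb i hiL hC
    obtain ⟨hi0, him⟩ := PySem.List.mem_pyRange_one.mp hiL
    obtain ⟨hp0, hpn, hgf, hgs⟩ := hC
    refine hnb ((mem_pvBadPairs f s o).mpr ⟨(o + i).toNat, i.toNat, by omega, by omega, ?_, ?_, by omega⟩)
    · rw [PySem.List.pyGet?_of_nonneg _ hp0] at hgf; exact hgf
    · rw [PySem.List.pyGet?_of_nonneg _ hi0] at hgs; exact hgs

-- pigeonhole, one direction: a free shift in [lo,hi] keeps the count below the interval size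
theorem countP_lt_of_notmem (L : List Int) (hnd : L.Nodup) (lo hi o : Int)
    (h1 : lo ≤ o) (h2 : o ≤ hi) (h3 : o ∉ L) :
    ((L.countP (fun x => decide (lo ≤ x ∧ x ≤ hi)) : Int)) < hi - lo + 1 := by
  rw [List.countP_eq_length_filter]
  set F := L.filter (fun x => decide (lo ≤ x ∧ x ≤ hi)) with hF
  have hndF : F.Nodup := hnd.filter _
  have hsub : F.toFinset ⊆ (Finset.Icc lo hi).erase o := by
    intro x hx
    rw [List.mem_toFinset, hF, List.mem_filter] at hx
    obtain ⟨hxL, hxp⟩ := hx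
    simp only [decide_eq_true_eq] at hxp
    refine Finset.mem_erase.mpr ⟨fun he => h3 (he ▸ hxL), Finset.mem_Icc.mpr hxp⟩
  have hcard := Finset.card_le_card hsub
  rw [List.toFinset_card_of_nodup hndF] at hcard
  have hoIcc : o ∈ Finset.Icc lo hi := Finset.mem_Icc.mpr ⟨h1, h2⟩
  rw [Finset.card_erase_of_mem hoIcc, Int.card_Icc] at hcard
  omega

-- pigeonhole, the other direction: an unsaturated interval contains a free shift
theorem exists_notmem_of_countP_lt (L : List Int) (lo hi : Int)
    (h : ((L.countP (fun x => decide (lo ≤ x ∧ x ≤ hi)) : Int)) < hi - lo + 1) :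
    ∃ o, lo ≤ o ∧ o ≤ hi ∧ o ∉ L := by
  by_contra hall
  push_neg at hall
  rw [List.countP_eq_length_filter] at h
  set F := L.filter (fun x => decide (lo ≤ x ∧ x ≤ hi)) with hF
  have hsub : Finset.Icc lo hi ⊆ F.toFinset := by
    intro x hx
    rw [Finset.mem_Icc] at hx
    rw [List.mem_toFinset, hF, List.mem_filter]
    exact ⟨hall x hx.1 hx.2, by simp [hx.1, hx.2]⟩
  have hcard := Finset.card_le_card hsub
  have hlen := F.toFinset_card_le
  rw [Int.card_Icc] at hcard
  omega

-- the countdown loop returns n + m - best, given best = the largest collision-free overlap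
theorem pvLoopB_eq (n m : Int) (bad : List Int) (hnd : bad.Nodup) (best : Int)
    (hb0 : 0 ≤ best)
    (hbmem : best = 0 ∨ ∃ o, (-m + 1 ≤ o ∧ o < n) ∧ o ∉ bad ∧ pvOv n m o = best)
    (hble : ∀ o, -m + 1 ≤ o → o < n → o ∉ bad → pvOv n m o ≤ best) :
    ∀ v : Nat, (v : Int) ≤ min n m →
      (∀ o, -m + 1 ≤ o → o < n → o ∉ bad → pvOv n m o ≤ (v : Int)) →
      pvLoopB n m bad v = n + m - best := by
  intro v
  induction v with
  | zero =>
    intro _ hub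
    have hbz : best = 0 := by
      rcases hbmem with h | ⟨o, ⟨ho1, ho2⟩, hgood, heq⟩
      · exact h
      · have := hub o ho1 ho2 hgood
        omega
    simp [pvLoopB, hbz]
  | succ v ih =>
    intro hv hub
    simp only [pvLoopB]
    split_ifs with hcond
    · -- the interval of shifts with overlap ≥ v+1 has a free shift
      push_cast at hcond
      obtain ⟨o, ho1, ho2, hgood⟩ := exists_notmem_of_countP_lt bad _ _ hcond
      have hoR1 : -m + 1 ≤ o := by omega
      have hoR2 : o < n := by omega
      have hov_ge : (v : Int) + 1 ≤ pvOv n m o := by unfold pvOv; push_cast at hv; omega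
      have hov_le := hub o hoR1 hoR2 hgood
      have hb_ge : (v : Int) + 1 ≤ best := le_trans hov_ge (hble o hoR1 hoR2 hgood)
      have hb_le : best ≤ (v : Int) + 1 := by
        rcases hbmem with h | ⟨o', ⟨ho1', ho2'⟩, hgood', heq⟩
        · omega
        · have := hub o' ho1' ho2' hgood'
          omega
      omega
    · -- every shift with overlap ≥ v+1 collides: tighten the bound and recurse
      push_cast at hcond
      apply ih (by push_cast at hv ⊢; omega)
      intro o ho1 ho2 hgood
      by_contra hgt
      push_neg at hgt
      have hin : ((v : Int) + 1) - m ≤ o ∧ o ≤ n - ((v : Int) + 1) := by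
        have : pvOv n m o ≥ (v : Int) + 1 := by omega
        unfold pvOv at this
        omega
      have := countP_lt_of_notmem bad hnd _ _ o hin.1 hin.2 hgood
      omega

-- ===== VERDICT (by name: the statement is the Claim_ definition above) =====
theorem find_minimum_width_spec : Claim_equal_find_minimum_width := by
  intro fg sg _
  unfold Spec_find_minimum_width find_minimum_width find_minimum_width_alt
  dsimp only
  set f := fg.toList with hf
  set s := sg.toList with hs
  set n : Int := (f.length : Int) with hn
  set m : Int := (s.length : Int) with hm
  have hn0 : 0 ≤ n := by positivity
  have hm0 : 0 ≤ m := by positivity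
  set cA : Int → Bool := fun o => pvCheckA f s n o (PySem.List.pyRange 0 m 1) with hcA
  set best : Int := pvGMax (pvOv n m) cA (PySem.List.pyRange (-m + 1) n 1) 0 with hbest
  -- translate the validity test and set membership
  have hgood : ∀ o : Int, cA o = true ↔ o ∉ PySem.Set.ofList (pvBadPairs f s) := by
    intro o
    rw [hcA]
    rw [validA_iff f s o]
    rw [not_iff_not]
    exact (PySem.Set.mem_ofList _ _).symm
  -- A's side
  have hA : (PySem.List.pyRange (-m + 1) n 1).foldl
      (fun min_width offset =>
        if pvCheckA f s n offset (PySem.List.pyRange 0 m 1) then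
          min min_width (max n (offset + m) - min 0 offset)
        else min_width) (n + m) = n + m - best := by
    have := foldA_eq f s (PySem.List.pyRange (-m + 1) n 1) 0
    rw [sub_zero] at this
    exact this
  rw [hA]
  -- B's side
  have hfacts0 : 0 ≤ best := pvGMax_init_le _ _ _ 0
  have hfactsmem : best = 0 ∨ ∃ o, (-m + 1 ≤ o ∧ o < n) ∧
      o ∉ PySem.Set.ofList (pvBadPairs f s) ∧ pvOv n m o = best := by
    rcases pvGMax_eq_init_or_mem (pvOv n m) cA (PySem.List.pyRange (-m + 1) n 1) 0 with h | ⟨o, ho, hco, heq⟩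
    · exact Or.inl h
    · exact Or.inr ⟨o, PySem.List.mem_pyRange_one.mp ho, (hgood o).mp hco, heq.symm⟩
  have hfactsle : ∀ o, -m + 1 ≤ o → o < n → o ∉ PySem.Set.ofList (pvBadPairs f s) →
      pvOv n m o ≤ best := by
    intro o h1 h2 h3
    exact pvGMax_le_of_mem _ _ _ 0 o (PySem.List.mem_pyRange_one.mpr ⟨h1, h2⟩) ((hgood o).mpr h3)
  have hB := pvLoopB_eq n m (PySem.Set.ofList (pvBadPairs f s)) (PySem.Set.nodup_ofList _)
    best hfacts0 hfactsmem hfactsle (min n m).toNat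
    (by omega)
    (by
      intro o _ _ _
      have : pvOv n m o ≤ min n m := by unfold pvOv; omega
      omega)
  rw [show PySem.Set.ofList ((pvIdx2 f).flatMap fun i => (pvIdx2 s).map fun j => i - j)
      = PySem.Set.ofList (pvBadPairs f s) from rfl]
  rw [hB]
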